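-- pv_equiv track=rewrite | github.com/huyuling0816/Judicial-Analysis-System | code/APP1/nlp_method.py | find_continuous
-- ===== SOURCE A (Python) =====
-- def find_continuous(list,words,postags):
-- 	continuous_list=[]
-- 	for i in range(0, len(words)):
-- 		if postags[i] in list:
-- 			j = i
-- 			while (postags[j] in list):
-- 				j = j + 1
-- 				if j>=len(postags):break
--
-- 			continuous_list.append(''.join(words[i:j]))
-- 	return continuous_list
-- ===== SOURCE B (Python) =====
-- def find_continuous(list, words, postags):
--     members = set(list)
--     n = len(postags)
--     # suffix[i] = ''.join of the words of the run starting at i (''; if postags[i] not in members)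
--     suffix = [''] * (n + 1)
--     for i in range(n - 1, -1, -1):
--         if postags[i] in members:
--             w = words[i] if i < len(words) else ''
--             suffix[i] = w + suffix[i + 1]
--     return [suffix[i] for i in range(len(words)) if postags[i] in members]
-- ===== Notes on version B (the rewrite author's own statement) =====
-- stated objective: faster
-- what changed: A rescans forward from every run position with an inner while-loop and re-joins each slice from scratch; B makes one right-to-left pass that precomputes each position's run-suffix join into an array, then emits it per qualifying position with no inner loop.
import Mathlib
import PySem

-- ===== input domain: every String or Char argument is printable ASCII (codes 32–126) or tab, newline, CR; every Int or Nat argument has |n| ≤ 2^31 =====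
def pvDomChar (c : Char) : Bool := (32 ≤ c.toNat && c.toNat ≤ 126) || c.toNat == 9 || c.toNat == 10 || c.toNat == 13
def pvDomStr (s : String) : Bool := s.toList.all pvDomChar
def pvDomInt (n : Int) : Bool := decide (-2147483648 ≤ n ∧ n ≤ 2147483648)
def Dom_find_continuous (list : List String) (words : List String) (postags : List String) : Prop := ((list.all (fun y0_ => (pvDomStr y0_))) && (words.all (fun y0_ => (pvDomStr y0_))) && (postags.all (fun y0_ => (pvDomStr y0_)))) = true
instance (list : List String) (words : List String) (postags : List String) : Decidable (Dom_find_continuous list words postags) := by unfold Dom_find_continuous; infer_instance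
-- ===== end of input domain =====

-- B replaces A's per-position inner rescan and per-position slice re-join by one right-to-left pass that
-- precomputes each position's run-suffix join (measured faster in a timing run); equivalence of the
-- return values is proved on Pre_ (len(words) ≤ len(postags)); outside Pre_ both raise IndexError.

-- ===== PORT A =====
-- the inner 'while postags[j] in list: j += 1; if j >= len(postags): break'
def fcWhile (list : List String) (postags : List String) (j : Nat) : Nat :=
  if h : j < postags.length then
    if postags[j] ∈ list then
      if j + 1 ≥ postags.length then j + 1
      else fcWhile list postags (j + 1)
    else j
  else j
termination_by postags.length - j

def find_continuous (list : List String) (words : List String) (postags : List String) : List String :=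
  (List.range words.length).foldl (fun acc i =>
    if h : i < postags.length then
      if postags[i] ∈ list then
        acc ++ [PySem.Str.join "" (PySem.List.slice words (some (i : Int)) (some ((fcWhile list postags i : Nat) : Int)))]
      else acc
    else acc) []  -- postags[i] with i ≥ len(postags) raises IndexError in Python: excluded by Pre_

-- ===== PORT B =====
-- the backward loop: builds the suffix array (length n+1, last entry ''), right to left
def fcSuffix (members : PySem.Set String) (words : List String) (i : Nat) (tags : List String) : List String :=
  match tags with
  | [] => [""]
  | t :: rest =>
    let s := fcSuffix members words (i + 1) rest
    (if PySem.Set.contains members t then words.getD i "" ++ s.headD "" else "") :: s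

def find_continuous_alt (list : List String) (words : List String) (postags : List String) : List String :=
  let members := PySem.Set.ofList list
  let suffix := fcSuffix members words 0 postags
  (List.range words.length).filterMap (fun i =>
    if h : i < postags.length then
      if PySem.Set.contains members postags[i] then some (suffix.getD i "") else none
    else none)  -- postags[i] with i ≥ len(postags) raises IndexError in Python: excluded by Pre_

-- ===== PRECONDITION & SPEC =====
-- A (and B) raise IndexError via postags[i] whenever words is longer than postags; exactly those inputs are excluded.
def Pre_find_continuous (list : List String) (words : List String) (postags : List String) : Prop :=
  words.length ≤ postags.length
instance (list : List String) (words : List String) (postags : List String) : Decidable (Pre_find_continuous list words postags) := by unfold Pre_find_continuous; infer_instance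

def pvWitness_find_continuous : List String × List String × List String := (["n"], ["ab"], ["n", "v"])

def Spec_find_continuous (list : List String) (words : List String) (postags : List String) (out : List String) : Prop := out = find_continuous_alt list words postags
instance (list : List String) (words : List String) (postags : List String) (out : List String) : Decidable (Spec_find_continuous list words postags out) := by unfold Spec_find_continuous; infer_instance

-- ===== CLAIM (what is proved, stated in full; the proofs are below) =====
def Claim_equal_find_continuous : Prop := ∀ (list : List String) (words : List String) (postags : List String), Dom_find_continuous list words postags → Pre_find_continuous list words postags → Spec_find_continuous list words postags (find_continuous list words postags)

-- ===== LEMMAS AND PROOFS =====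

theorem join_nil_str : PySem.Str.join "" ([] : List String) = "" := by
  simp [PySem.Str.join, PySem.Chars.join, List.intercalate]

theorem join_cons_str (x : String) (xs : List String) :
    PySem.Str.join "" (x :: xs) = x ++ PySem.Str.join "" xs := by
  induction xs with
  | nil => simp [PySem.Str.join, PySem.Chars.join, List.intercalate]
  | cons y ys ih => simp [PySem.Str.join, PySem.Chars.join, List.intercalate] at *

theorem contains_ofList_iff (list : List String) (x : String) :
    PySem.Set.contains (PySem.Set.ofList list) x = true ↔ x ∈ list := by
  simp [PySem.Set.contains, PySem.Set.mem_ofList]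

theorem slice_nat (words : List String) (i j : Nat) :
    PySem.List.slice words (some (i : Int)) (some (j : Int)) = (words.drop i).take (j - i) :=
  PySem.List.slice_natCast ..

theorem join_slice_step (words : List String) (i j : Nat) (hij : i < j) :
    PySem.Str.join "" (PySem.List.slice words (some (i : Int)) (some (j : Int))) =
    words.getD i "" ++ PySem.Str.join "" (PySem.List.slice words (some ((i + 1 : Nat) : Int)) (some (j : Int))) := by
  rw [slice_nat, slice_nat]
  by_cases hi : i < words.length
  · rw [List.drop_eq_getElem_cons hi]
    have hj : j - i = (j - (i + 1)) + 1 := by omega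
    rw [hj, List.take_succ_cons, join_cons_str, List.getD_eq_getElem words "" hi]
  · have h1 : words.drop i = [] := List.drop_eq_nil_of_le (by omega)
    have h2 : words.drop (i + 1) = [] := List.drop_eq_nil_of_le (by omega)
    have h3 : words.getD i "" = "" := List.getD_eq_default words "" (by omega)
    rw [h1, h2, h3]
    simp only [List.take_nil, join_nil_str]
    decide

theorem fcSuffix_cons (m : PySem.Set String) (w : List String) (i : Nat) (t : String) (rest : List String) :
    fcSuffix m w i (t :: rest) =
      (if PySem.Set.contains m t then w.getD i "" ++ (fcSuffix m w (i + 1) rest).headD "" else "") ::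
        fcSuffix m w (i + 1) rest := rfl

theorem fcWhile_ge (list postags : List String) (j : Nat) : j ≤ fcWhile list postags j := by
  unfold fcWhile
  split
  · split
    · split
      · omega
      · have := fcWhile_ge list postags (j + 1)
        omega
    · omega
  · omega
termination_by postags.length - j

-- indexing the suffix list = head of the suffix list built from position i+k
theorem fcSuffix_getD (m : PySem.Set String) (w : List String) :
    ∀ (tags : List String) (i k : Nat),
      (fcSuffix m w i tags).getD k "" = (fcSuffix m w (i + k) (tags.drop k)).headD "" := by
  intro tags
  induction tags with
  | nil => intro i k; cases k <;> simp [fcSuffix]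
  | cons t rest ih =>
    intro i k
    cases k with
    | zero => simp [fcSuffix_cons]
    | succ k =>
      rw [fcSuffix_cons]
      simp only [List.getD_cons_succ, List.drop_succ_cons]
      rw [ih (i + 1) k]
      congr 2
      omega

-- the core invariant: at a run position, the precomputed suffix equals A's joined slice
theorem fcSuffix_head_eq_join (list words postags : List String) :
    ∀ (n i : Nat), postags.length - i ≤ n → (h : i < postags.length) → postags[i] ∈ list →
      (fcSuffix (PySem.Set.ofList list) words i (postags.drop i)).headD "" =
      PySem.Str.join "" (PySem.List.slice words (some (i : Int)) (some ((fcWhile list postags i : Nat) : Int))) := by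
  intro n
  induction n with
  | zero => intro i h1 h2; omega
  | succ n ih =>
    intro i h1 h2 hmem
    have hdrop : postags.drop i = postags[i] :: postags.drop (i + 1) := List.drop_eq_getElem_cons h2
    rw [hdrop, fcSuffix_cons, List.headD_cons,
        if_pos ((contains_ofList_iff list postags[i]).mpr hmem)]
    -- unfold one step of fcWhile at i
    have hW : fcWhile list postags i =
        if i + 1 ≥ postags.length then i + 1 else fcWhile list postags (i + 1) := by
      rw [fcWhile]
      simp [h2, hmem]
    have hge : i + 1 ≤ fcWhile list postags i := by
      rw [hW]; split
      · omega
      · exact fcWhile_ge list postags (i + 1)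
    rw [join_slice_step words i (fcWhile list postags i) (by omega)]
    congr 1
    by_cases hlen : i + 1 ≥ postags.length
    · -- run hits the end of postags
      have : fcWhile list postags i = i + 1 := by rw [hW, if_pos hlen]
      rw [this, List.drop_eq_nil_of_le (le_of_eq (by omega)), slice_nat]
      simp [fcSuffix, join_nil_str]
    · push Not at hlen
      have hWnext : fcWhile list postags i = fcWhile list postags (i + 1) := by
        rw [hW, if_neg (by omega)]
      rw [hWnext]
      by_cases hmem' : postags[i + 1] ∈ list
      · exact ih (i + 1) (by omega) hlen hmem'
      · -- run ends at i+1
        have : fcWhile list postags (i + 1) = i + 1 := by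
          rw [fcWhile]
          simp [hlen, hmem']
        rw [this]
        have hdrop' : postags.drop (i + 1) = postags[i + 1] :: postags.drop (i + 2) :=
          List.drop_eq_getElem_cons hlen
        rw [hdrop']
        have hc : PySem.Set.contains (PySem.Set.ofList list) postags[i + 1] = false := by
          rw [← Bool.not_eq_true, contains_ofList_iff]; exact hmem'
        rw [fcSuffix_cons, List.headD_cons, if_neg (fun hcontr => hmem' ((contains_ofList_iff _ _).mp hcontr)), slice_nat]
        simp [join_nil_str]

theorem main_aux (list words postags : List String) (hpre : words.length ≤ postags.length) :
    ∀ n, n ≤ words.length →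
      (List.range n).foldl (fun acc i =>
        if h : i < postags.length then
          if postags[i] ∈ list then
            acc ++ [PySem.Str.join "" (PySem.List.slice words (some (i : Int)) (some ((fcWhile list postags i : Nat) : Int)))]
          else acc
        else acc) [] =
      (List.range n).filterMap (fun i =>
        if h : i < postags.length then
          if PySem.Set.contains (PySem.Set.ofList list) postags[i] then
            some ((fcSuffix (PySem.Set.ofList list) words 0 postags).getD i "")
          else none
        else none) := by
  intro n
  induction n with
  | zero => intro _; rfl
  | succ n ih =>
    intro hn
    have hn' : n < postags.length := by omega
    rw [List.range_succ, List.foldl_append, List.filterMap_append, ih (by omega)]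
    simp only [List.foldl_cons, List.foldl_nil, List.filterMap_cons, List.filterMap_nil]
    rw [dif_pos hn', dif_pos hn']
    by_cases hmem : postags[n] ∈ list
    · rw [if_pos hmem, if_pos ((contains_ofList_iff list postags[n]).mpr hmem)]
      have h1 := fcSuffix_getD (PySem.Set.ofList list) words postags 0 n
      rw [Nat.zero_add] at h1
      rw [h1, fcSuffix_head_eq_join list words postags (postags.length - n) n (by omega) hn' hmem]
    · rw [if_neg hmem, if_neg (by rw [contains_ofList_iff]; exact hmem)]
      simp

-- ===== VERDICT (by name: the statement is the Claim_ definition above) =====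
theorem find_continuous_spec : Claim_equal_find_continuous := by
  intro list words postags _ hpre
  unfold Spec_find_continuous find_continuous find_continuous_alt
  exact main_aux list words postags hpre words.length (le_refl _)
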